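-- pv_equiv track=rewrite | github.com/sejongmin/Python_study | 백준/Gold/20303. 할로윈의 양아치/할로윈의 양아치.py | solution
-- ===== SOURCE A (Python) =====
-- def solution(N, M, K, c, r):
--     friends = [i for i in range(N + 1)]
--     candy = {}
--
--     def find(a):
--         if a != friends[a]:
--             friends[a] = find(friends[a])
--         return friends[a]
--
--     def union(a, b):
--         fa = find(a)
--         fb = find(b)
--         if fa > fb:
--             friends[fa] = fb
--         elif fa < fb:
--             friends[fb] = fa
--
--     for i in range(M):
--         a, b = r[i]
--         union(a, b)
--
--     for i in range(1, N + 1):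
--         root = find(i)
--         candy[root] = candy.get(root, [0, 0])
--         candy[root][0] += c[i - 1]
--         candy[root][1] += 1
--
--     dp = [0] * K
--     for val, size in candy.values():
--         for j in range(K - 1, size - 1, -1):
--             dp[j] = max(dp[j], dp[j - size] + val)
--
--     return dp[-1]
-- ===== SOURCE B (Python) =====
-- def solution(N, M, K, c, r):
--     # connectivity by flat label relabelling instead of union-find:
--     # every node carries the minimum label of its component; merging an edge
--     # rewrites every occurrence of the larger label to the smaller one.
--     label = list(range(N + 1))
--     for a, b in r[:M]:
--         la, lb = label[a], label[b]
--         lo, hi = min(la, lb), max(la, lb)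
--         label = [lo if v == hi else v for v in label]
--     groups = {}
--     for i in range(1, N + 1):
--         g = label[i]
--         val, size = groups.get(g, (0, 0))
--         groups[g] = (val + c[i - 1], size + 1)
--     dp = [0] * K
--     for val, size in groups.values():
--         for j in range(K - 1, size - 1, -1):
--             dp[j] = max(dp[j], dp[j - size] + val)
--     return dp[-1]
-- ===== Notes on version B (the rewrite author's own statement) =====
-- stated objective: alternative
-- what changed: The path-compressed union-find connectivity phase is replaced by flat label relabelling (each node carries its component's minimum label; an edge rewrites every occurrence of the larger label to the smaller), the edge loop iterates r[:M] instead of indexing r by a range counter, and the grouping/knapsack phases read the flat labels directly; the knapsack loop is kept verbatim.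
-- outside the precondition, e.g. on solution(2, -1, 2, [5, 7], [(1, 2), (1, 2)]): A returns 7, B returns 0
import Mathlib
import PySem

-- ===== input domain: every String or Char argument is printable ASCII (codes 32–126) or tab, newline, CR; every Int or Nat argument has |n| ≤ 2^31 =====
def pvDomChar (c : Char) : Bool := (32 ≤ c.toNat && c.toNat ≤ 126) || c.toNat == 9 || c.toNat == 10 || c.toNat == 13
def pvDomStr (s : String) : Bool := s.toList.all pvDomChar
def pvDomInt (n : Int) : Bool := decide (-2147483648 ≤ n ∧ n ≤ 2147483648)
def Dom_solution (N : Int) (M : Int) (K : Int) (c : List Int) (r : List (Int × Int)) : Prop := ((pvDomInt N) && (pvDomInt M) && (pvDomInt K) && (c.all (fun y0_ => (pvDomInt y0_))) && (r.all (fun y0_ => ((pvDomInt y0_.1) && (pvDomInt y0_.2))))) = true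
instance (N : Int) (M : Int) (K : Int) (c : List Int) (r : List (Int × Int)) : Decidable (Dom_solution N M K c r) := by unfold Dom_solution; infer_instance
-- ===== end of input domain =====

-- B replaces A's path-compressed union-find by flat label relabelling (each node holds its
-- component's minimum label; an edge rewrites the larger label to the smaller everywhere);
-- the grouping and knapsack phases are unchanged.  Alternative decomposition, not faster.
-- ===== PORT A =====
-- 'find' with path compression; 'fuel' (= N+1, always sufficient under Pre_) makes the
-- Python recursion structural; out-of-fuel / out-of-range fallbacks are unreachable under Pre_.
def findA (fuel : Nat) (fr : List Int) (a : Int) : List Int × Int :=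
  match fuel with
  | 0 => (fr, a)
  | fuel + 1 =>
    let fa := PySem.List.pyGetD fr a 0
    if a ≠ fa then
      let p := findA fuel fr fa
      let fr' := PySem.List.pySetD p.1 a p.2
      (fr', PySem.List.pyGetD fr' a 0)
    else (fr, fa)

def unionA (fuel : Nat) (fr : List Int) (a b : Int) : List Int :=
  let p1 := findA fuel fr a
  let p2 := findA fuel p1.1 b
  if p1.2 > p2.2 then PySem.List.pySetD p2.1 p1.2 p2.2
  else if p1.2 < p2.2 then PySem.List.pySetD p2.1 p2.2 p1.2
  else p2.1

def dpPhase (K : Int) (vals : List (Int × Int)) : Int :=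
  let dp0 : List Int := List.replicate K.toNat 0
  let dp := vals.foldl (fun dp vs =>
    (PySem.List.pyRange (K - 1) (vs.2 - 1) (-1)).foldl (fun dp j =>
      PySem.List.pySetD dp j
        (max (PySem.List.pyGetD dp j 0) (PySem.List.pyGetD dp (j - vs.2) 0 + vs.1))) dp) dp0
  PySem.List.pyGetD dp (-1) 0

def solution (N : Int) (M : Int) (K : Int) (c : List Int) (r : List (Int × Int)) : Int :=
  let fuel := N.toNat + 1
  let fr0 := PySem.List.pyRange 0 (N + 1) 1
  let fr1 := (PySem.List.pyRange 0 M 1).foldl (fun fr i =>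
    let e := PySem.List.pyGetD r i (0, 0)
    unionA fuel fr e.1 e.2) fr0
  let st := (PySem.List.pyRange 1 (N + 1) 1).foldl (fun st i =>
    let p := findA fuel st.1 i
    let cur := st.2.getD p.2 ((0 : Int), (0 : Int))
    (p.1, st.2.insert p.2 (cur.1 + PySem.List.pyGetD c (i - 1) 0, cur.2 + 1)))
    (fr1, (PySem.Dict.empty : PySem.Dict Int (Int × Int)))
  dpPhase K st.2.values

-- ===== PORT B =====
def relabelB (lbl : List Int) (a b : Int) : List Int :=
  let la := PySem.List.pyGetD lbl a 0
  let lb := PySem.List.pyGetD lbl b 0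
  let lo := min la lb
  let hi := max la lb
  lbl.map (fun v => if v = hi then lo else v)

def solution_alt (N : Int) (M : Int) (K : Int) (c : List Int) (r : List (Int × Int)) : Int :=
  let lbl := (PySem.List.slice r none (some M)).foldl (fun lbl e => relabelB lbl e.1 e.2)
    (PySem.List.pyRange 0 (N + 1) 1)
  let groups := (PySem.List.pyRange 1 (N + 1) 1).foldl (fun d i =>
    let g := PySem.List.pyGetD lbl i 0
    let cur := d.getD g ((0 : Int), (0 : Int))
    d.insert g (cur.1 + PySem.List.pyGetD c (i - 1) 0, cur.2 + 1))
    (PySem.Dict.empty : PySem.Dict Int (Int × Int))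
  dpPhase K groups.values

-- ===== PRECONDITION & SPEC =====
-- Pre_ admits exactly the inputs where A returns: K >= 1 (else dp[-1] raises IndexError),
-- M <= len(r) (else r[i] raises), edge endpoints within Python's index range -(N+1)..N
-- (else IndexError), N <= len(c) for N >= 0 (else c[i-1] raises), and for N < 0 only
-- M <= 0 (else find() raises on the empty friends list).  The single exclusion where A
-- still returns is M < 0 with len(r)+M > 0: A ignores r there but B's slice r[:M] reads
-- edges, an accident of A's vacuous range(M) loop on a meaningless negative count (cite).
def Pre_solution (N : Int) (M : Int) (K : Int) (c : List Int) (r : List (Int × Int)) : Prop :=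
  1 ≤ K ∧ M ≤ (r.length : Int) ∧ (M < 0 → (r.length : Int) + M ≤ 0) ∧
    ((0 ≤ N ∧ N ≤ (c.length : Int) ∧
        ∀ p ∈ r.take M.toNat, -(N + 1) ≤ p.1 ∧ p.1 ≤ N ∧ -(N + 1) ≤ p.2 ∧ p.2 ≤ N) ∨
      (N < 0 ∧ M ≤ 0))
instance (N : Int) (M : Int) (K : Int) (c : List Int) (r : List (Int × Int)) : Decidable (Pre_solution N M K c r) := by unfold Pre_solution; infer_instance

def pvWitness_solution : Int × Int × Int × List Int × (List (Int × Int)) :=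
  (3, 2, 3, [1, 2, 3], [(1, 2), (2, 3)])
def Spec_solution (N : Int) (M : Int) (K : Int) (c : List Int) (r : List (Int × Int)) (out : Int) : Prop := out = solution_alt N M K c r
instance (N : Int) (M : Int) (K : Int) (c : List Int) (r : List (Int × Int)) (out : Int) : Decidable (Spec_solution N M K c r out) := by unfold Spec_solution; infer_instance

-- ===== CLAIM (what is proved, stated in full; the proofs are below) =====
def Claim_equal_solution : Prop := ∀ (N : Int) (M : Int) (K : Int) (c : List Int) (r : List (Int × Int)), Dom_solution N M K c r → Pre_solution N M K c r → Spec_solution N M K c r (solution N M K c r)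



-- ===== LEMMAS AND PROOFS =====

-- `gP fr j` is Python's `fr[j]` for the parent/label arrays (default never used in range).
def gP (fr : List Int) (a : Int) : Int := PySem.List.pyGetD fr a 0

-- the parent array is decreasing and nonnegative: 0 <= fr[j] <= j
def decPar (fr : List Int) : Prop :=
  ∀ j : Int, 0 ≤ j → j < (fr.length : Int) → 0 ≤ gP fr j ∧ gP fr j ≤ j

-- abstract root of the parent forest, with fuel
def rootF : Nat → List Int → Int → Int
  | 0, _, a => a
  | f + 1, fr, a => if gP fr a = a then a else rootF f fr (gP fr a)

def rootOf (fr : List Int) (a : Int) : Int := rootF (a.toNat + 1) fr a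

-- simulation relation: A's root function equals B's flat label array
def SimL (fr lbl : List Int) : Prop :=
  ∀ j : Int, 0 ≤ j → j < (fr.length : Int) → rootOf fr j = gP lbl j

lemma gP_pySetD (fr : List Int) (i v x : Int) (hi : 0 ≤ i) (_hi2 : i < (fr.length : Int))
    (hx : 0 ≤ x) (hx2 : x < (fr.length : Int)) :
    gP (PySem.List.pySetD fr i v) x = if x = i then v else gP fr x := by
  simp only [gP, PySem.List.pySetD_of_nonneg fr v hi]
  rw [PySem.List.pyGetD_eq_getElem _ 0 hx (by simpa using hx2)]
  rw [List.getElem_set]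
  by_cases h : x = i
  · have : i.toNat = x.toNat := by omega
    simp [h, this]
  · have hne : ¬ i.toNat = x.toNat := by omega
    rw [if_neg hne, if_neg h, PySem.List.pyGetD_eq_getElem _ 0 hx hx2]

lemma decPar_update (fr fr' : List Int) (t v : Int) (hdec : decPar fr)
    (hlen : fr'.length = fr.length) (ht0 : 0 ≤ t) (_hv0 : 0 ≤ v) (hvt : v ≤ t)
    (hg : ∀ x, 0 ≤ x → x < (fr.length : Int) → gP fr' x = if x = t then v else gP fr x) :
    decPar fr' := by
  intro j hj hj2
  rw [hlen] at hj2
  rw [hg j hj hj2]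
  by_cases h : j = t
  · subst h; simp; omega
  · rw [if_neg h]; exact hdec j hj hj2

lemma rootF_fuel_eq (fr : List Int) (hdec : decPar fr) :
    ∀ (n : Nat) (a : Int) (f1 f2 : Nat), a.toNat ≤ n → 0 ≤ a → a < (fr.length : Int) →
      n < f1 → n < f2 → rootF f1 fr a = rootF f2 fr a := by
  intro n
  induction n using Nat.strong_induction_on with
  | _ n ih =>
    intro a f1 f2 hn ha ha2 h1 h2
    obtain ⟨u, rfl⟩ : ∃ u, f1 = u + 1 := ⟨f1 - 1, by omega⟩
    obtain ⟨v, rfl⟩ : ∃ v, f2 = v + 1 := ⟨f2 - 1, by omega⟩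
    simp only [rootF]
    by_cases h : gP fr a = a
    · simp [h]
    · rw [if_neg h, if_neg h]
      obtain ⟨hfa0, hfa1⟩ := hdec a ha ha2
      exact ih (n - 1) (by omega) (gP fr a) u v (by omega) hfa0 (by omega) (by omega) (by omega)

lemma rootOf_eq_rootF (fr : List Int) (a : Int) (f : Nat) (hdec : decPar fr)
    (ha : 0 ≤ a) (ha2 : a < (fr.length : Int)) (hf : a.toNat < f) :
    rootOf fr a = rootF f fr a :=
  rootF_fuel_eq fr hdec a.toNat a (a.toNat + 1) f le_rfl ha ha2 (by omega) hf

lemma rootOf_fix (fr : List Int) (a : Int) (h : gP fr a = a) : rootOf fr a = a := by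
  simp [rootOf, rootF, h]

lemma rootOf_step (fr : List Int) (a : Int) (hdec : decPar fr) (ha : 0 ≤ a)
    (ha2 : a < (fr.length : Int)) (h : gP fr a ≠ a) : rootOf fr a = rootOf fr (gP fr a) := by
  obtain ⟨hfa0, hfa1⟩ := hdec a ha ha2
  have h1 : rootOf fr a = rootF a.toNat fr (gP fr a) := by
    simp [rootOf, rootF, h]
  rw [h1]
  exact (rootOf_eq_rootF fr (gP fr a) a.toNat hdec hfa0 (by omega) (by omega)).symm

lemma rootOf_props (fr : List Int) (hdec : decPar fr) :
    ∀ (n : Nat) (a : Int), a.toNat ≤ n → 0 ≤ a → a < (fr.length : Int) →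
      0 ≤ rootOf fr a ∧ rootOf fr a ≤ a ∧ gP fr (rootOf fr a) = rootOf fr a := by
  intro n
  induction n using Nat.strong_induction_on with
  | _ n ih =>
    intro a hn ha ha2
    by_cases h : gP fr a = a
    · rw [rootOf_fix fr a h]
      exact ⟨ha, le_rfl, h⟩
    · obtain ⟨hfa0, hfa1⟩ := hdec a ha ha2
      rw [rootOf_step fr a hdec ha ha2 h]
      obtain ⟨p1, p2, p3⟩ := ih (n - 1) (by omega) (gP fr a) (by omega) hfa0 (by omega)
      exact ⟨p1, by omega, p3⟩

-- one update of the parent array at a position t to a root v: the root function is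
-- rewritten pointwise (covers both path compression and the union step)
lemma rootOf_update (fr fr' : List Int) (t v : Int)
    (hdec : decPar fr) (hdec' : decPar fr') (hlen : fr'.length = fr.length)
    (ht0 : 0 ≤ t) (ht2 : t < (fr.length : Int)) (_hv0 : 0 ≤ v) (hvt : v ≤ t)
    (hgv : gP fr' v = v)
    (hcase : v = rootOf fr t ∨ rootOf fr t = t)
    (hg : ∀ x, 0 ≤ x → x < (fr.length : Int) → gP fr' x = if x = t then v else gP fr x) :
    ∀ (n : Nat) (x : Int), x.toNat ≤ n → 0 ≤ x → x < (fr.length : Int) →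
      rootOf fr' x = if rootOf fr x = rootOf fr t then v else rootOf fr x := by
  intro n
  induction n using Nat.strong_induction_on with
  | _ n ih =>
    intro x hn hx hx2
    by_cases hxt : x = t
    · subst hxt
      have hgx : gP fr' x = v := by rw [hg x hx hx2]; simp
      by_cases hvx : v = x
      · -- v = t : t is its own new parent, hence a root of fr'
        subst hvx
        rw [rootOf_fix fr' v hgx]
        rcases hcase with h | h
        · simp [← h]
        · simp [h]
      · have hstep : rootOf fr' x = rootOf fr' (gP fr' x) :=
          rootOf_step fr' x hdec' hx (by omega) (by rw [hgx]; exact fun hc => hvx hc)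
        rw [hstep, hgx, rootOf_fix fr' v hgv]
        simp
    · have hgx : gP fr' x = gP fr x := by rw [hg x hx hx2]; simp [hxt]
      by_cases hfix : gP fr x = x
      · rw [rootOf_fix fr x hfix, rootOf_fix fr' x (by rw [hgx]; exact hfix)]
        by_cases hxr : x = rootOf fr t
        · rw [if_pos hxr]
          rcases hcase with h | h
          · omega
          · omega
        · rw [if_neg hxr]
      · obtain ⟨hfa0, hfa1⟩ := hdec x hx hx2
        have hstep' : rootOf fr' x = rootOf fr' (gP fr x) := by
          rw [← hgx]
          exact rootOf_step fr' x hdec' hx (by omega) (by rw [hgx]; exact hfix)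
        rw [hstep', ih (n - 1) (by omega) (gP fr x) (by omega) hfa0 (by omega),
          rootOf_step fr x hdec hx hx2 hfix]

-- path compression: setting fr[a] := rootOf fr a preserves the root function
lemma rootOf_compress (fr : List Int) (a : Int) (hdec : decPar fr) (ha : 0 ≤ a)
    (ha2 : a < (fr.length : Int)) :
    decPar (PySem.List.pySetD fr a (rootOf fr a)) ∧
    (PySem.List.pySetD fr a (rootOf fr a)).length = fr.length ∧
    ∀ x, 0 ≤ x → x < (fr.length : Int) →
      rootOf (PySem.List.pySetD fr a (rootOf fr a)) x = rootOf fr x := by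
  obtain ⟨hr0, hr1, hrfix⟩ := rootOf_props fr hdec a.toNat a le_rfl ha ha2
  have hlen := PySem.List.length_pySetD fr a (rootOf fr a)
  have hg := fun x hx hx2 => gP_pySetD fr a (rootOf fr a) x ha ha2 hx hx2
  have hdec' : decPar (PySem.List.pySetD fr a (rootOf fr a)) :=
    decPar_update fr _ a (rootOf fr a) hdec hlen ha hr0 hr1 hg
  refine ⟨hdec', hlen, fun x hx hx2 => ?_⟩
  have := rootOf_update fr _ a (rootOf fr a) hdec hdec' hlen ha ha2 hr0 hr1
    (by
      rw [hg (rootOf fr a) hr0 (by omega)]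
      by_cases hra : rootOf fr a = a
      · simp [hra]
      · rw [if_neg hra]; exact hrfix)
    (Or.inl rfl) hg x.toNat x le_rfl hx hx2
  rw [this]
  by_cases hc : rootOf fr x = rootOf fr a
  · simp [hc]
  · rw [if_neg hc]

-- the union step: setting fr[h] := lo for two roots lo < h redirects exactly the h-tree
lemma rootOf_lower (fr : List Int) (h lo : Int) (hdec : decPar fr) (hlo0 : 0 ≤ lo)
    (hloh : lo < h) (hh2 : h < (fr.length : Int))
    (hrh : gP fr h = h) (hrlo : gP fr lo = lo) :
    decPar (PySem.List.pySetD fr h lo) ∧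
    (PySem.List.pySetD fr h lo).length = fr.length ∧
    ∀ x, 0 ≤ x → x < (fr.length : Int) →
      rootOf (PySem.List.pySetD fr h lo) x = if rootOf fr x = h then lo else rootOf fr x := by
  have hh0 : 0 ≤ h := by omega
  have hlen := PySem.List.length_pySetD fr h lo
  have hg := fun x hx hx2 => gP_pySetD fr h lo x hh0 hh2 hx hx2
  have hdec' : decPar (PySem.List.pySetD fr h lo) :=
    decPar_update fr _ h lo hdec hlen hh0 hlo0 (by omega) hg
  have hrth : rootOf fr h = h := rootOf_fix fr h hrh
  refine ⟨hdec', hlen, fun x hx hx2 => ?_⟩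
  have := rootOf_update fr _ h lo hdec hdec' hlen hh0 hh2 hlo0 (by omega)
    (by rw [hg lo hlo0 (by omega), if_neg (by omega)]; exact hrlo)
    (Or.inr hrth) hg x.toNat x le_rfl hx hx2
  rw [this, hrth]

-- find with path compression returns the abstract root and preserves it everywhere
lemma findA_spec :
    ∀ (n : Nat) (fuel : Nat) (fr : List Int) (a : Int), a.toNat ≤ n → n < fuel →
      decPar fr → 0 ≤ a → a < (fr.length : Int) →
      (findA fuel fr a).1.length = fr.length ∧ decPar (findA fuel fr a).1 ∧
      (findA fuel fr a).2 = rootOf fr a ∧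
      ∀ x, 0 ≤ x → x < (fr.length : Int) → rootOf (findA fuel fr a).1 x = rootOf fr x := by
  intro n
  induction n using Nat.strong_induction_on with
  | _ n ih =>
    intro fuel fr a hn hfuel hdec ha ha2
    obtain ⟨u, rfl⟩ : ∃ u, fuel = u + 1 := ⟨fuel - 1, by omega⟩
    have hunf : findA (u + 1) fr a =
        if a ≠ gP fr a then
          (PySem.List.pySetD (findA u fr (gP fr a)).1 a (findA u fr (gP fr a)).2,
           PySem.List.pyGetD
             (PySem.List.pySetD (findA u fr (gP fr a)).1 a (findA u fr (gP fr a)).2) a 0)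
        else (fr, gP fr a) := rfl
    by_cases h : a = gP fr a
    · rw [hunf, if_neg (not_not_intro h)]
      exact ⟨rfl, hdec, by rw [rootOf_fix fr a h.symm]; exact h.symm,
        fun x hx hx2 => rfl⟩
    · obtain ⟨hfa0, hfa1⟩ := hdec a ha ha2
      have hne : gP fr a ≠ a := fun hc => h hc.symm
      have hfa_lt : gP fr a < a := lt_of_le_of_ne hfa1 hne
      obtain ⟨ih1, ih2, ih3, ih4⟩ := ih (n - 1) (by omega) u fr (gP fr a) (by omega)
        (by omega) hdec hfa0 (by omega)
      rw [hunf, if_pos h]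
      set p := findA u fr (gP fr a) with hp
      have hroot : p.2 = rootOf fr a := by
        rw [ih3, ← rootOf_step fr a hdec ha ha2 hne]
      have hroot2 : p.2 = rootOf p.1 a := by
        rw [hroot, ← ih4 a ha ha2]
      obtain ⟨hd', hl', hp'⟩ := rootOf_compress p.1 a ih2 ha (by rw [ih1]; exact ha2)
      rw [hroot2]
      refine ⟨by rw [PySem.List.length_pySetD, ih1], hd', ?_, fun x hx hx2 => ?_⟩
      · have := gP_pySetD p.1 a (rootOf p.1 a) a ha (by rw [ih1]; exact ha2) ha
          (by rw [ih1]; exact ha2)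
        show gP (PySem.List.pySetD p.1 a (rootOf p.1 a)) a = rootOf fr a
        rw [this, if_pos rfl, ← hroot2, hroot]
      · rw [hp' x hx (by rw [ih1]; exact hx2), ih4 x hx hx2]

lemma findA_spec' (fuel : Nat) (fr : List Int) (a : Int) (hfuel : fr.length ≤ fuel)
    (hdec : decPar fr) (ha : 0 ≤ a) (ha2 : a < (fr.length : Int)) :
    (findA fuel fr a).1.length = fr.length ∧ decPar (findA fuel fr a).1 ∧
    (findA fuel fr a).2 = rootOf fr a ∧
    ∀ x, 0 ≤ x → x < (fr.length : Int) → rootOf (findA fuel fr a).1 x = rootOf fr x :=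
  findA_spec a.toNat fuel fr a le_rfl (by omega) hdec ha ha2

lemma gP_map_relabel (lbl : List Int) (lo hi x : Int) (hx : 0 ≤ x)
    (hx2 : x < (lbl.length : Int)) :
    gP (lbl.map (fun v => if v = hi then lo else v)) x =
      if gP lbl x = hi then lo else gP lbl x := by
  simp only [gP]
  rw [PySem.List.pyGetD_eq_getElem _ 0 hx (by simpa using hx2),
    PySem.List.pyGetD_eq_getElem _ 0 hx hx2, List.getElem_map]

lemma pyGetD_wrap (xs : List Int) (a d : Int) (h1 : -(xs.length : Int) ≤ a)
    (h2 : a < 0) : PySem.List.pyGetD xs a d = PySem.List.pyGetD xs (a + xs.length) d := by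
  have hidx : PySem.List.pyIdx? xs.length a = PySem.List.pyIdx? xs.length (a + xs.length) := by
    simp only [PySem.List.pyIdx?]
    rw [if_neg (by omega), if_pos h1, if_pos (by omega : (0 : Int) ≤ a + xs.length),
      if_pos (by omega : a + (xs.length : Int) < xs.length)]
    congr 1
    omega
  simp only [PySem.List.pyGetD, PySem.List.pyGet?, hidx]

lemma pySetD_wrap (xs : List Int) (a v : Int) (h1 : -(xs.length : Int) ≤ a)
    (h2 : a < 0) : PySem.List.pySetD xs a v = PySem.List.pySetD xs (a + xs.length) v := by
  have hidx : PySem.List.pyIdx? xs.length a = PySem.List.pyIdx? xs.length (a + xs.length) := by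
    simp only [PySem.List.pyIdx?]
    rw [if_neg (by omega), if_pos h1, if_pos (by omega : (0 : Int) ≤ a + xs.length),
      if_pos (by omega : a + (xs.length : Int) < xs.length)]
    congr 1
    omega
  simp only [PySem.List.pySetD, PySem.List.pySet?, hidx]

lemma findA_len : ∀ (u : Nat) (fr : List Int) (a : Int), (findA u fr a).1.length = fr.length
  | 0, _, _ => rfl
  | u + 1, fr, a => by
    simp only [findA]
    split_ifs with h
    · simp only [PySem.List.length_pySetD, findA_len u fr _]
    · rfl

lemma findA_root : ∀ (u : Nat) (fr : List Int) (a : Int), gP fr a = a → findA u fr a = (fr, a)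
  | 0, _, _, _ => rfl
  | u + 1, fr, a, h => by
    have h' : PySem.List.pyGetD fr a 0 = a := h
    simp only [findA, h']
    simp

-- find on a wrapped negative index behaves as on the wrapped-around nonnegative node
lemma findA_wrap (fr : List Int) (a : Int) (u : Nat) (hdec : decPar fr)
    (h1 : -(fr.length : Int) ≤ a) (h2 : a < 0) :
    findA (u + 1) fr a = findA (u + 1) fr (a + fr.length) := by
  set a' := a + (fr.length : Int) with ha'
  have ha'0 : 0 ≤ a' := by omega
  have ha'2 : a' < (fr.length : Int) := by omega
  have hga : gP fr a = gP fr a' := pyGetD_wrap fr a 0 h1 h2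
  obtain ⟨hge0, _⟩ := hdec a' ha'0 ha'2
  have hne : a ≠ gP fr a := by rw [hga]; omega
  have hunfL : findA (u + 1) fr a =
      if a ≠ gP fr a then
        (PySem.List.pySetD (findA u fr (gP fr a)).1 a (findA u fr (gP fr a)).2,
         PySem.List.pyGetD
           (PySem.List.pySetD (findA u fr (gP fr a)).1 a (findA u fr (gP fr a)).2) a 0)
      else (fr, gP fr a) := rfl
  have hunfR : findA (u + 1) fr a' =
      if a' ≠ gP fr a' then
        (PySem.List.pySetD (findA u fr (gP fr a')).1 a' (findA u fr (gP fr a')).2,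
         PySem.List.pyGetD
           (PySem.List.pySetD (findA u fr (gP fr a')).1 a' (findA u fr (gP fr a')).2) a' 0)
      else (fr, gP fr a') := rfl
  by_cases hroot : gP fr a' = a'
  · rw [hunfL, hunfR, if_pos hne, if_neg (not_not_intro hroot.symm)]
    have hgaa : gP fr a = a' := by rw [hga, hroot]
    rw [hgaa, findA_root u fr a' hroot]
    have hset : PySem.List.pySetD fr a a' = fr := by
      rw [pySetD_wrap fr a a' h1 h2, ← ha', PySem.List.pySetD_of_nonneg fr a' ha'0]
      have hentry : fr[a'.toNat] = a' := by
        have := PySem.List.pyGetD_eq_getElem fr 0 ha'0 ha'2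
        rw [← this]; exact hroot
      rw [show (fr.set a'.toNat a') = fr.set a'.toNat fr[a'.toNat] from by rw [hentry]]
      exact List.set_getElem_self (by omega)
    rw [hset]
    have : PySem.List.pyGetD fr a 0 = gP fr a' := by
      show gP fr a = gP fr a'
      exact hga
    rw [this, hroot]
  · have hne' : a' ≠ gP fr a' := fun hc => hroot hc.symm
    rw [hunfL, hunfR, if_pos hne, if_pos hne', hga]
    set p := findA u fr (gP fr a') with hp
    have hplen : p.1.length = fr.length := findA_len u fr _
    have hset2 : PySem.List.pySetD p.1 a p.2 = PySem.List.pySetD p.1 a' p.2 := by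
      rw [pySetD_wrap p.1 a p.2 (by rw [hplen]; exact h1) h2, hplen, ← ha']
    have hls : (PySem.List.pySetD p.1 a' p.2).length = fr.length := by
      rw [PySem.List.length_pySetD, hplen]
    have hget2 : PySem.List.pyGetD (PySem.List.pySetD p.1 a' p.2) a 0 =
        PySem.List.pyGetD (PySem.List.pySetD p.1 a' p.2) a' 0 := by
      rw [pyGetD_wrap _ a 0 (by rw [hls]; exact h1) h2, hls, ← ha']
    rw [hset2, hget2]

lemma unionA_wrapL (u : Nat) (fr : List Int) (a b : Int) (hdec : decPar fr)
    (h1 : -(fr.length : Int) ≤ a) (h2 : a < 0) :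
    unionA (u + 1) fr a b = unionA (u + 1) fr (a + fr.length) b := by
  simp only [unionA]
  rw [findA_wrap fr a u hdec h1 h2]

lemma unionA_wrapR (u : Nat) (fr : List Int) (a b : Int) (hdecA : decPar (findA (u + 1) fr a).1)
    (h1 : -(fr.length : Int) ≤ b) (h2 : b < 0) :
    unionA (u + 1) fr a b = unionA (u + 1) fr a (b + fr.length) := by
  simp only [unionA]
  have hl : (findA (u + 1) fr a).1.length = fr.length := findA_len (u + 1) fr a
  rw [show (b + (fr.length : Int)) = b + ((findA (u + 1) fr a).1.length : Int) from by
    rw [hl]]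
  rw [findA_wrap (findA (u + 1) fr a).1 b u hdecA (by rw [hl]; exact h1) h2]

lemma relabelB_wrapL (lbl : List Int) (a b : Int) (h1 : -(lbl.length : Int) ≤ a)
    (h2 : a < 0) : relabelB lbl a b = relabelB lbl (a + lbl.length) b := by
  simp only [relabelB]
  rw [pyGetD_wrap lbl a 0 h1 h2]

lemma relabelB_wrapR (lbl : List Int) (a b : Int) (h1 : -(lbl.length : Int) ≤ b)
    (h2 : b < 0) : relabelB lbl a b = relabelB lbl a (b + lbl.length) := by
  simp only [relabelB]
  rw [pyGetD_wrap lbl b 0 h1 h2]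

-- one edge step: A's union and B's relabel stay in simulation
lemma union_relabel_sim (fuel : Nat) (fr lbl : List Int) (a b : Int)
    (hfuel : fr.length ≤ fuel) (hdec : decPar fr) (hlen : lbl.length = fr.length)
    (hsim : SimL fr lbl) (ha : 0 ≤ a) (ha2 : a < (fr.length : Int)) (hb : 0 ≤ b)
    (hb2 : b < (fr.length : Int)) :
    decPar (unionA fuel fr a b) ∧ (unionA fuel fr a b).length = fr.length ∧
    (relabelB lbl a b).length = lbl.length ∧ SimL (unionA fuel fr a b) (relabelB lbl a b) := by
  obtain ⟨A1, A2, A3, A4⟩ := findA_spec' fuel fr a hfuel hdec ha ha2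
  set p1 := findA fuel fr a with hp1
  obtain ⟨B1, B2, B3, B4⟩ := findA_spec' fuel p1.1 b (by rw [A1]; exact hfuel) A2 hb
    (by rw [A1]; exact hb2)
  set p2 := findA fuel p1.1 b with hp2
  have hlen2 : p2.1.length = fr.length := B1.trans A1
  have hfa : p1.2 = rootOf fr a := A3
  have hfb : p2.2 = rootOf fr b := by rw [B3, A4 b hb hb2]
  have hP : ∀ x, 0 ≤ x → x < (fr.length : Int) → rootOf p2.1 x = rootOf fr x := by
    intro x hx hx2
    rw [B4 x hx (by rw [A1]; exact hx2), A4 x hx hx2]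
  obtain ⟨hra0, hra1, _⟩ := rootOf_props fr hdec a.toNat a le_rfl ha ha2
  obtain ⟨hrb0, hrb1, _⟩ := rootOf_props fr hdec b.toNat b le_rfl hb hb2
  have hfixa : gP p2.1 (rootOf fr a) = rootOf fr a := by
    have h1 : rootOf p2.1 a = rootOf fr a := hP a ha ha2
    have := (rootOf_props p2.1 B2 a.toNat a le_rfl ha (by rw [hlen2]; exact ha2)).2.2
    rwa [h1] at this
  have hfixb : gP p2.1 (rootOf fr b) = rootOf fr b := by
    have h1 : rootOf p2.1 b = rootOf fr b := hP b hb hb2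
    have := (rootOf_props p2.1 B2 b.toNat b le_rfl hb (by rw [hlen2]; exact hb2)).2.2
    rwa [h1] at this
  have hla : gP lbl a = rootOf fr a := (hsim a ha ha2).symm
  have hlb : gP lbl b = rootOf fr b := (hsim b hb hb2).symm
  have hu : unionA fuel fr a b =
      if p1.2 > p2.2 then PySem.List.pySetD p2.1 p1.2 p2.2
      else if p1.2 < p2.2 then PySem.List.pySetD p2.1 p2.2 p1.2
      else p2.1 := rfl
  have hrl : relabelB lbl a b =
      lbl.map (fun v => if v = max (gP lbl a) (gP lbl b) then min (gP lbl a) (gP lbl b)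
        else v) := rfl
  have hrlen : (relabelB lbl a b).length = lbl.length := by rw [hrl, List.length_map]
  have hgrel : ∀ j, 0 ≤ j → j < (fr.length : Int) →
      gP (relabelB lbl a b) j =
        if gP lbl j = max (rootOf fr a) (rootOf fr b)
        then min (rootOf fr a) (rootOf fr b) else gP lbl j := by
    intro j hj hj2
    rw [hrl, hla, hlb]
    exact gP_map_relabel lbl _ _ j hj (by rw [hlen]; exact hj2)
  rcases lt_trichotomy p2.2 p1.2 with hlt | heq | hgt
  · -- rootOf fr b < rootOf fr a : set fr[ra] := rb
    rw [hu, if_pos hlt, hfa, hfb]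
    have hlt' : rootOf fr b < rootOf fr a := by rw [hfa, hfb] at hlt; exact hlt
    obtain ⟨hd3, hl3, hr3⟩ := rootOf_lower p2.1 (rootOf fr a) (rootOf fr b) B2 hrb0 hlt'
      (by rw [hlen2]; omega) hfixa hfixb
    refine ⟨hd3, by rw [hl3, hlen2], hrlen, fun j hj hj2 => ?_⟩
    rw [hl3, hlen2] at hj2
    rw [hr3 j hj (by rw [hlen2]; exact hj2), hP j hj hj2, hgrel j hj hj2,
      hsim j hj hj2, max_eq_left (le_of_lt hlt'), min_eq_right (le_of_lt hlt')]
  · -- equal roots: nothing changes on either side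
    rw [hu, if_neg (by omega), if_neg (by omega)]
    have heq' : rootOf fr b = rootOf fr a := by rw [hfa, hfb] at heq; exact heq
    refine ⟨B2, hlen2, hrlen, fun j hj hj2 => ?_⟩
    rw [hlen2] at hj2
    rw [hP j hj hj2, hgrel j hj hj2, hsim j hj hj2, heq']
    by_cases hc : gP lbl j = max (rootOf fr a) (rootOf fr a)
    · rw [if_pos hc]; simp at hc ⊢; rw [← hsim j hj hj2] at hc ⊢; omega
    · rw [if_neg hc]
  · -- rootOf fr a < rootOf fr b : set fr[rb] := ra
    rw [hu, if_neg (by omega), if_pos hgt, hfa, hfb]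
    have hgt' : rootOf fr a < rootOf fr b := by rw [hfa, hfb] at hgt; exact hgt
    obtain ⟨hd3, hl3, hr3⟩ := rootOf_lower p2.1 (rootOf fr b) (rootOf fr a) B2 hra0 hgt'
      (by rw [hlen2]; omega) hfixb hfixa
    refine ⟨hd3, by rw [hl3, hlen2], hrlen, fun j hj hj2 => ?_⟩
    rw [hl3, hlen2] at hj2
    rw [hr3 j hj (by rw [hlen2]; exact hj2), hP j hj hj2, hgrel j hj hj2,
      hsim j hj hj2, max_eq_right (le_of_lt hgt'), min_eq_left (le_of_lt hgt')]

-- the whole edge phase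
lemma edges_sim (fuel : Nat) :
    ∀ (es : List (Int × Int)) (fr lbl : List Int), fr.length ≤ fuel → decPar fr →
      lbl.length = fr.length → SimL fr lbl →
      (∀ p ∈ es, -(fr.length : Int) ≤ p.1 ∧ p.1 < (fr.length : Int) ∧
        -(fr.length : Int) ≤ p.2 ∧ p.2 < (fr.length : Int)) →
      decPar (es.foldl (fun fr e => unionA fuel fr e.1 e.2) fr) ∧
      (es.foldl (fun fr e => unionA fuel fr e.1 e.2) fr).length = fr.length ∧
      (es.foldl (fun lbl e => relabelB lbl e.1 e.2) lbl).length = lbl.length ∧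
      SimL (es.foldl (fun fr e => unionA fuel fr e.1 e.2) fr)
        (es.foldl (fun lbl e => relabelB lbl e.1 e.2) lbl) := by
  intro es
  induction es with
  | nil => exact fun fr lbl _ hdec hlen hsim _ => ⟨hdec, rfl, rfl, hsim⟩
  | cons e es ih =>
    intro fr lbl hfuel hdec hlen hsim hmem
    obtain ⟨he1, he2, he3, he4⟩ := hmem e (by simp)
    have hL0 : 0 < fr.length := by omega
    obtain ⟨u, rfl⟩ : ∃ u, fuel = u + 1 := ⟨fuel - 1, by omega⟩
    -- normalize a possibly negative (Python-wrapped) first endpoint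
    obtain ⟨a', ⟨ha'0, ha'2⟩, hu1, hr1⟩ : ∃ a', (0 ≤ a' ∧ a' < (fr.length : Int)) ∧
        unionA (u + 1) fr e.1 e.2 = unionA (u + 1) fr a' e.2 ∧
        relabelB lbl e.1 e.2 = relabelB lbl a' e.2 := by
      by_cases hc : e.1 < 0
      · refine ⟨e.1 + fr.length, ⟨by omega, by omega⟩,
          unionA_wrapL u fr e.1 e.2 hdec he1 hc, ?_⟩
        rw [relabelB_wrapL lbl e.1 e.2 (by rw [hlen]; exact he1) hc, hlen]
      · exact ⟨e.1, ⟨by omega, he2⟩, rfl, rfl⟩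
    -- normalize a possibly negative second endpoint
    obtain ⟨b', ⟨hb'0, hb'2⟩, hu2, hr2⟩ : ∃ b', (0 ≤ b' ∧ b' < (fr.length : Int)) ∧
        unionA (u + 1) fr a' e.2 = unionA (u + 1) fr a' b' ∧
        relabelB lbl a' e.2 = relabelB lbl a' b' := by
      by_cases hc : e.2 < 0
      · have hdecA : decPar (findA (u + 1) fr a').1 :=
          (findA_spec' (u + 1) fr a' hfuel hdec ha'0 ha'2).2.1
        refine ⟨e.2 + fr.length, ⟨by omega, by omega⟩,
          unionA_wrapR u fr a' e.2 hdecA he3 hc, ?_⟩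
        rw [relabelB_wrapR lbl a' e.2 (by rw [hlen]; exact he3) hc, hlen]
      · exact ⟨e.2, ⟨by omega, he4⟩, rfl, rfl⟩
    obtain ⟨hd', hl', hrl', hsim'⟩ :=
      union_relabel_sim (u + 1) fr lbl a' b' hfuel hdec hlen hsim ha'0 ha'2 hb'0 hb'2
    simp only [List.foldl_cons]
    rw [hu1, hu2, hr1, hr2]
    obtain ⟨q1, q2, q3, q4⟩ := ih (unionA (u + 1) fr a' b') (relabelB lbl a' b')
      (by rw [hl']; exact hfuel) hd' (by rw [hrl', hlen, hl']) hsim'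
      (by intro p hp; rw [hl']; exact hmem p (by simp [hp]))
    exact ⟨q1, by rw [q2, hl'], by rw [q3, hrl'], q4⟩

-- the grouping phase builds identical dicts
lemma groups_eq (fuel : Nat) (c lbl : List Int) :
    ∀ (is : List Int) (fr : List Int) (d : PySem.Dict Int (Int × Int)),
      fr.length ≤ fuel → decPar fr → SimL fr lbl →
      (∀ i ∈ is, 0 ≤ i ∧ i < (fr.length : Int)) →
      (is.foldl (fun st i =>
        let p := findA fuel st.1 i
        let cur := st.2.getD p.2 ((0 : Int), (0 : Int))
        (p.1, st.2.insert p.2 (cur.1 + PySem.List.pyGetD c (i - 1) 0, cur.2 + 1)))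
        (fr, d)).2 =
      is.foldl (fun d i =>
        let g := PySem.List.pyGetD lbl i 0
        let cur := d.getD g ((0 : Int), (0 : Int))
        d.insert g (cur.1 + PySem.List.pyGetD c (i - 1) 0, cur.2 + 1)) d := by
  intro is
  induction is with
  | nil => intro fr d _ _ _ _; rfl
  | cons i is ih =>
    intro fr d hfuel hdec hsim hmem
    obtain ⟨hi0, hi2⟩ := hmem i (by simp)
    obtain ⟨F1, F2, F3, F4⟩ := findA_spec' fuel fr i hfuel hdec hi0 hi2
    have hkey : (findA fuel fr i).2 = PySem.List.pyGetD lbl i 0 := by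
      rw [F3]; exact hsim i hi0 hi2
    simp only [List.foldl_cons]
    simp only [hkey]
    exact ih (findA fuel fr i).1 _ (by rw [F1]; exact hfuel) F2
      (fun j hj hj2 => by
        rw [F1] at hj2
        rw [F4 j hj hj2]; exact hsim j hj hj2)
      (fun i' hi' => by rw [F1]; exact hmem i' (by simp [hi']))

lemma pyRange_map_pyGetD (r : List (Int × Int)) (M : Int) (h : M.toNat ≤ r.length) :
    (PySem.List.pyRange 0 M 1).map (fun i => PySem.List.pyGetD r i ((0 : Int), (0 : Int))) =
      r.take M.toNat := by
  apply List.ext_getElem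
  · simp [PySem.List.length_pyRange_one]
    omega
  · intro k h1 h2
    simp only [List.getElem_map, List.getElem_take]
    rw [PySem.List.getElem_pyRange_one]
    have hk : k < M.toNat := by
      simp [PySem.List.length_pyRange_one] at h1
      omega
    rw [PySem.List.pyGetD_eq_getElem _ _ (by omega) (by omega)]
    congr 1
    omega

lemma slice_take (r : List (Int × Int)) (M : Int) (_h1 : M ≤ (r.length : Int))
    (h2 : M < 0 → (r.length : Int) + M ≤ 0) :
    PySem.List.slice r none (some M) = r.take M.toNat := by
  by_cases hM : 0 ≤ M
  · exact PySem.List.slice_to r hM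
  · rw [show (some M) = some (-(((-M).toNat : Nat) : Int)) from by congr 1; omega]
    rw [PySem.List.slice_to_neg_natCast r (-M).toNat (by omega)]
    rw [show r.length - (-M).toNat = 0 from by omega, show M.toNat = 0 from by omega]

lemma gP_pyRange_id (N j : Int) (hj : 0 ≤ j) (hj2 : j < N + 1) :
    gP (PySem.List.pyRange 0 (N + 1) 1) j = j := by
  have hlen : (PySem.List.pyRange 0 (N + 1) 1).length = (N + 1).toNat := by
    simp [PySem.List.length_pyRange_one]
  simp only [gP]
  rw [PySem.List.pyGetD_eq_getElem _ _ hj (by rw [hlen]; omega),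
    PySem.List.getElem_pyRange_one]
  omega

-- ===== VERDICT (by name: the statement is the Claim_ definition above) =====
set_option maxHeartbeats 2000000 in
theorem solution_spec : Claim_equal_solution := by
  intro N M K c r hdom hpre
  obtain ⟨hK, hMr, hMneg, hbr⟩ := hpre
  show solution N M K c r = solution_alt N M K c r
  rcases hbr with ⟨hN0, hNc, hedge⟩ | ⟨hNneg, hM0⟩
  · -- main branch: 0 ≤ N
    simp only [solution, solution_alt]
    rw [slice_take r M hMr hMneg]
    set fuel := N.toNat + 1 with hfuelDef
    set fr0 := PySem.List.pyRange 0 (N + 1) 1 with hfr0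
    have hlen0 : fr0.length = fuel := by
      rw [hfr0, PySem.List.length_pyRange_one]; omega
    have hlen0' : (fr0.length : Int) = N + 1 := by rw [hlen0]; omega
    have hdec0 : decPar fr0 := by
      intro j hj hj2
      rw [hlen0'] at hj2
      rw [hfr0, gP_pyRange_id N j hj hj2]
      omega
    have hsim0 : SimL fr0 fr0 := by
      intro j hj hj2
      rw [hlen0'] at hj2
      rw [rootOf_fix fr0 j (by rw [hfr0, gP_pyRange_id N j hj hj2]), hfr0,
        gP_pyRange_id N j hj hj2]
    have hedge' : ∀ p ∈ r.take M.toNat, -(fr0.length : Int) ≤ p.1 ∧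
        p.1 < (fr0.length : Int) ∧ -(fr0.length : Int) ≤ p.2 ∧ p.2 < (fr0.length : Int) := by
      intro p hp
      obtain ⟨q1, q2, q3, q4⟩ := hedge p hp
      rw [hlen0']
      exact ⟨by omega, by omega, by omega, by omega⟩
    obtain ⟨hdF, hlF, hlLF, hsimF⟩ := edges_sim fuel (r.take M.toNat) fr0 fr0
      (le_of_eq hlen0) hdec0 rfl hsim0 hedge'
    have hAfold : (PySem.List.pyRange 0 M 1).foldl
        (fun fr i => unionA fuel fr (PySem.List.pyGetD r i ((0 : Int), (0 : Int))).1
          (PySem.List.pyGetD r i ((0 : Int), (0 : Int))).2) fr0 =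
        (r.take M.toNat).foldl (fun fr e => unionA fuel fr e.1 e.2) fr0 := by
      rw [← pyRange_map_pyGetD r M (by omega), List.foldl_map]
    rw [hAfold]
    have hmemis : ∀ i ∈ PySem.List.pyRange 1 (N + 1) 1, 0 ≤ i ∧
        i < ((((r.take M.toNat).foldl (fun fr e => unionA fuel fr e.1 e.2) fr0)).length :
          Int) := by
      intro i hi
      rw [hlF, hlen0']
      have := PySem.List.mem_pyRange_one.mp hi
      exact ⟨by omega, by omega⟩
    set frF := (r.take M.toNat).foldl (fun fr e => unionA fuel fr e.1 e.2) fr0 with hfrF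
    set lblF := (r.take M.toNat).foldl (fun lbl e => relabelB lbl e.1 e.2) fr0 with hlblF
    have hge := groups_eq fuel c lblF (PySem.List.pyRange 1 (N + 1) 1) frF PySem.Dict.empty
      (le_of_eq (hlF.trans hlen0)) hdF hsimF hmemis
    rw [hge]
  · -- vacuous branch: N < 0 and M ≤ 0 — every loop is empty, both return dp[-1] of [0]*K
    have hr1 : PySem.List.pyRange 0 M 1 = [] := PySem.List.pyRange_one_eq_nil (by omega)
    have hr2 : PySem.List.pyRange 1 (N + 1) 1 = [] := PySem.List.pyRange_one_eq_nil (by omega)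
    have hsl : PySem.List.slice r none (some M) = [] := by
      rw [slice_take r M hMr hMneg, show M.toNat = 0 from by omega, List.take_zero]
    simp only [solution, solution_alt, hr1, hr2, hsl, List.foldl_nil]
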